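-- pv_equiv track=rewrite | github.com/CrSb0001/mathfunclib | mathfunclib/cryptography/simpleciphers.py | encryp_rotN
-- ===== SOURCE A (Python) =====
-- def encryp_rotN(_str,N=13):
--     '''
--     Encrypts a string using ROT-N
--
--     :param _str: The input string
--     :param N:    What ROT function we are using. By default,
--                  this is 13.
--     '''
--     alphabet = 'abcdefghijklmnopqrstuvwxyzabcdefghijklmnopqrstuvwxyABCDEFGHIJKLMNOPQRSTUVWXYZABCDEFGHIJKLMNOPQRSTUVWXY'
--
--     if type(_str)!=str:
--         return "Parameter [_str] must be a string."
--     if type(N)!=int: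
--         return "Parameter [N] must be an integer."
--     if (N<1) or (N>25):
--         return "Disallowed integer values detected."
--
--     RotN=''
--     for i in _str:
--         if i in alphabet:
--             RotN+=alphabet[alphabet.index(i)+N]
--         else:
--             RotN+=i
--     return RotN
-- ===== SOURCE B (Python) =====
-- def encryp_rotN(_str, N=13):
--     if type(_str) != str:
--         return "Parameter [_str] must be a string."
--     if type(N) != int:
--         return "Parameter [N] must be an integer."
--     if (N < 1) or (N > 25):
--         return "Disallowed integer values detected."
--     out = []
--     for c in _str:
--         if 'a' <= c <= 'z':
--             out.append(chr((ord(c) - 97 + N) % 26 + 97))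
--         elif 'A' <= c <= 'Z':
--             out.append(chr((ord(c) - 65 + N) % 26 + 65))
--         else:
--             out.append(c)
--     return ''.join(out)
-- ===== Notes on version B (the rewrite author's own statement) =====
-- stated objective: simpler
-- what changed: Replaces the 102-char double-alphabet lookup string with its linear alphabet.index scan per character by direct closed-form modular arithmetic (chr((ord(c)-base+N)%26+base)) on the two ASCII letter ranges.
import Mathlib
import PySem

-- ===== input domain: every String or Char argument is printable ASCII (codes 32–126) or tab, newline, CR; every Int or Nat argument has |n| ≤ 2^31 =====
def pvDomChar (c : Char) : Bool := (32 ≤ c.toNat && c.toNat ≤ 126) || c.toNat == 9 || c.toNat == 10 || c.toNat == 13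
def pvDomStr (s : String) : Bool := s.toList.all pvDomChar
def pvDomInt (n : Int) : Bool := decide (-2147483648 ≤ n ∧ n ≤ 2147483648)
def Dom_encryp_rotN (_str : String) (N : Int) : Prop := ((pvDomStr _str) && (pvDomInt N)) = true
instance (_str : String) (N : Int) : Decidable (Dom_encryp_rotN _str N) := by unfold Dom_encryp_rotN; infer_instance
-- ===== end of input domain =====

-- B replaces A's 102-char double-alphabet lookup string and alphabet.index scan by closed-form
-- modular arithmetic per character (objective: simpler; Python's type-guard branches are
-- unreachable under the fixed Lean types and so are not ported).

-- ===== PORT A =====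
def pvAlpha : List Char :=
  "abcdefghijklmnopqrstuvwxyzabcdefghijklmnopqrstuvwxyABCDEFGHIJKLMNOPQRSTUVWXYZABCDEFGHIJKLMNOPQRSTUVWXY".toList

-- one character of A's loop body: 'if i in alphabet: alphabet[alphabet.index(i)+N] else: i'
-- (alphabet.index(i)+N is always in range when i is found and 1 ≤ N ≤ 25, so the none branch of pyGet? never fires)
def pvEncA (N : Int) (c : Char) : Char :=
  if c ∈ pvAlpha then
    match PySem.List.index? pvAlpha c with
    | some idx => (PySem.List.pyGet? pvAlpha ((idx : Int) + N)).getD c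
    | none => c
  else c

def encryp_rotN (_str : String) (N : Int) : String :=
  if N < 1 ∨ N > 25 then "Disallowed integer values detected."
  else String.ofList (_str.toList.foldl (fun acc c => acc ++ [pvEncA N c]) [])

-- ===== PORT B =====
def pvEncB (N : Int) (c : Char) : Char :=
  if 'a' ≤ c ∧ c ≤ 'z' then
    Char.ofNat ((PySem.Int.mod (((c.toNat : Int) - 97) + N) 26).toNat + 97)
  else if 'A' ≤ c ∧ c ≤ 'Z' then
    Char.ofNat ((PySem.Int.mod (((c.toNat : Int) - 65) + N) 26).toNat + 65)
  else c

def encryp_rotN_alt (_str : String) (N : Int) : String :=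
  if N < 1 ∨ N > 25 then "Disallowed integer values detected."
  else String.ofList (_str.toList.map (pvEncB N))

-- ===== PRECONDITION & SPEC =====
def Spec_encryp_rotN (_str : String) (N : Int) (out : String) : Prop := out = encryp_rotN_alt _str N
instance (_str : String) (N : Int) (out : String) : Decidable (Spec_encryp_rotN _str N out) := by unfold Spec_encryp_rotN; infer_instance

-- ===== CLAIM (what is proved, stated in full; the proofs are below) =====
def Claim_equal_encryp_rotN : Prop := ∀ (_str : String) (N : Int), Dom_encryp_rotN _str N → Spec_encryp_rotN _str N (encryp_rotN _str N)

-- ===== LEMMAS AND PROOFS =====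

lemma pv_char_le_iff (a b : Char) : a ≤ b ↔ a.toNat ≤ b.toNat := by
  rw [Char.le_def, UInt32.le_iff_toNat_le]; rfl

set_option maxRecDepth 2500 in
lemma pv_alpha_code_bool : (pvAlpha.all fun c =>
    decide ((97 ≤ c.toNat ∧ c.toNat ≤ 122) ∨ (65 ≤ c.toNat ∧ c.toNat ≤ 90))) = true := by
  decide

lemma pv_alpha_code : ∀ c ∈ pvAlpha,
    (97 ≤ c.toNat ∧ c.toNat ≤ 122) ∨ (65 ≤ c.toNat ∧ c.toNat ≤ 90) := by
  intro c hc
  have h := List.all_eq_true.mp pv_alpha_code_bool c hc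
  exact of_decide_eq_true h

set_option maxRecDepth 2500 in
lemma pv_idx_lower : ∀ k ∈ List.range 26,
    PySem.List.index? pvAlpha (Char.ofNat (97 + k)) = some k := by
  decide

set_option maxRecDepth 2500 in
lemma pv_idx_upper : ∀ k ∈ List.range 26,
    PySem.List.index? pvAlpha (Char.ofNat (65 + k)) = some (51 + k) := by
  decide

set_option maxRecDepth 2500 in
lemma pv_get_lower : ∀ j ∈ List.range 51,
    pvAlpha[j]? = some (Char.ofNat (97 + j % 26)) := by
  decide

set_option maxRecDepth 2500 in
lemma pv_get_upper : ∀ j ∈ List.range 51,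
    pvAlpha[51 + j]? = some (Char.ofNat (65 + j % 26)) := by
  decide

lemma pv_foldl_append_map {α β : Type} (f : α → β) :
    ∀ (l : List α) (acc : List β), l.foldl (fun acc c => acc ++ [f c]) acc = acc ++ l.map f := by
  intro l
  induction l with
  | nil => simp
  | cons x xs ih => intro acc; simp [List.foldl, ih]

lemma pv_key (N : Int) (h1 : 1 ≤ N) (h2 : N ≤ 25) (c : Char) :
    pvEncA N c = pvEncB N c := by
  by_cases hmem : c ∈ pvAlpha
  · rcases pv_alpha_code c hmem with ⟨hl, hu⟩ | ⟨hl, hu⟩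
    · -- lowercase
      set k : Nat := c.toNat - 97 with hk
      have hck : Char.ofNat (97 + k) = c := by
        have h97 : 97 + k = c.toNat := by omega
        rw [h97]; exact Char.ofNat_toNat c
      have hidx : PySem.List.index? pvAlpha c = some k := by
        rw [← hck]; exact pv_idx_lower k (List.mem_range.mpr (by omega))
      have hnn : (0 : Int) ≤ (k : Int) + N := by omega
      have hj : ((k : Int) + N).toNat = k + N.toNat := by omega
      have hget : pvAlpha[k + N.toNat]? = some (Char.ofNat (97 + (k + N.toNat) % 26)) :=
        pv_get_lower (k + N.toNat) (List.mem_range.mpr (by omega))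
      have hBcond : 'a' ≤ c ∧ c ≤ 'z' := by
        have e1 : 'a'.toNat = 97 := rfl
        have e2 : 'z'.toNat = 122 := rfl
        exact ⟨(pv_char_le_iff _ _).mpr (by omega), (pv_char_le_iff _ _).mpr (by omega)⟩
      have hmodeq : (PySem.Int.mod (((c.toNat : Int) - 97) + N) 26).toNat + 97
          = 97 + (k + N.toNat) % 26 := by
        rw [PySem.Int.mod_eq_emod_of_pos (by norm_num)]
        omega
      simp only [pvEncA, pvEncB, if_pos hmem, if_pos hBcond, hidx,
        PySem.List.pyGet?_of_nonneg _ hnn, hj, hget, Option.getD_some, hmodeq]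
    · -- uppercase
      set k : Nat := c.toNat - 65 with hk
      have hck : Char.ofNat (65 + k) = c := by
        have h65 : 65 + k = c.toNat := by omega
        rw [h65]; exact Char.ofNat_toNat c
      have hidx : PySem.List.index? pvAlpha c = some (51 + k) := by
        rw [← hck]; exact pv_idx_upper k (List.mem_range.mpr (by omega))
      have hnn : (0 : Int) ≤ ((51 + k : Nat) : Int) + N := by omega
      have hj : (((51 + k : Nat) : Int) + N).toNat = 51 + (k + N.toNat) := by omega
      have hget : pvAlpha[51 + (k + N.toNat)]? = some (Char.ofNat (65 + (k + N.toNat) % 26)) :=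
        pv_get_upper (k + N.toNat) (List.mem_range.mpr (by omega))
      have hBcond1 : ¬ ('a' ≤ c ∧ c ≤ 'z') := by
        intro ⟨ha, _⟩
        rw [pv_char_le_iff] at ha
        have e1 : 'a'.toNat = 97 := rfl
        omega
      have hBcond2 : 'A' ≤ c ∧ c ≤ 'Z' := by
        have e1 : 'A'.toNat = 65 := rfl
        have e2 : 'Z'.toNat = 90 := rfl
        exact ⟨(pv_char_le_iff _ _).mpr (by omega), (pv_char_le_iff _ _).mpr (by omega)⟩
      have hmodeq : (PySem.Int.mod (((c.toNat : Int) - 65) + N) 26).toNat + 65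
          = 65 + (k + N.toNat) % 26 := by
        rw [PySem.Int.mod_eq_emod_of_pos (by norm_num)]
        omega
      simp only [pvEncA, pvEncB, if_pos hmem, if_neg hBcond1, if_pos hBcond2, hidx,
        PySem.List.pyGet?_of_nonneg _ hnn, hj, hget, Option.getD_some, hmodeq]
  · -- not a letter: both sides return c
    have hBcond1 : ¬ ('a' ≤ c ∧ c ≤ 'z') := by
      intro ⟨ha, hz⟩
      rw [pv_char_le_iff] at ha hz
      have e1 : 'a'.toNat = 97 := rfl
      have e2 : 'z'.toNat = 122 := rfl
      have hck : Char.ofNat (97 + (c.toNat - 97)) = c := by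
        have : 97 + (c.toNat - 97) = c.toNat := by omega
        rw [this]; exact Char.ofNat_toNat c
      have := pv_idx_lower (c.toNat - 97) (List.mem_range.mpr (by omega))
      rw [hck] at this
      exact hmem ((PySem.List.index?_isSome_iff _ _).mp (by rw [this]; rfl))
    have hBcond2 : ¬ ('A' ≤ c ∧ c ≤ 'Z') := by
      intro ⟨ha, hz⟩
      rw [pv_char_le_iff] at ha hz
      have e1 : 'A'.toNat = 65 := rfl
      have e2 : 'Z'.toNat = 90 := rfl
      have hck : Char.ofNat (65 + (c.toNat - 65)) = c := by
        have : 65 + (c.toNat - 65) = c.toNat := by omega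
        rw [this]; exact Char.ofNat_toNat c
      have := pv_idx_upper (c.toNat - 65) (List.mem_range.mpr (by omega))
      rw [hck] at this
      exact hmem ((PySem.List.index?_isSome_iff _ _).mp (by rw [this]; rfl))
    simp only [pvEncA, pvEncB, if_neg hmem, if_neg hBcond1, if_neg hBcond2]

-- ===== VERDICT (by name: the statement is the Claim_ definition above) =====
theorem encryp_rotN_spec : Claim_equal_encryp_rotN := by
  intro s N _hdom
  unfold Spec_encryp_rotN encryp_rotN encryp_rotN_alt
  split
  · rfl
  · rename_i hN
    push_neg at hN
    rw [pv_foldl_append_map]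
    simp only [List.nil_append]
    congr 1
    exact List.map_congr_left fun c _ => pv_key N hN.1 hN.2 c
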